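-- pv_equiv track=rewrite | github.com/PhilipJohnsen/eyetracked-chromatic-filtering | experiment_helper/scheduling_experiment.py | reading_cycle_orders
-- ===== SOURCE A (Python) =====
-- from itertools import permutations
-- from typing import Iterable
--
-- def reading_cycle_orders(
--     paragraph_files: Iterable[str],
--     practice_paragraph_file: str,
-- ) -> list[list[str]]:
--     files = sorted(str(name) for name in paragraph_files)
--     if practice_paragraph_file not in files:
--         raise ValueError(
--             f"Practice paragraph '{practice_paragraph_file}' is not available in loaded paragraph texts"
--         )
--
--     main_candidates = [name for name in files if name != practice_paragraph_file]
--     if len(main_candidates) < 3: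
--         raise ValueError("Reading counterbalancing requires at least 3 non-practice paragraphs")
--
--     main_set = main_candidates[:3]
--     return [list(order) for order in permutations(main_set)]
-- ===== SOURCE B (Python) =====
-- def _perms(items):
--     # recursive selection: pick each element in turn, permute the rest
--     if not items:
--         return [[]]
--     out = []
--     for i in range(len(items)):
--         rest = items[:i] + items[i + 1:]
--         for tail in _perms(rest):
--             out.append([items[i]] + tail)
--     return out
--
--
-- def reading_cycle_orders(paragraph_files, practice_paragraph_file):
--     names = [str(name) for name in paragraph_files]
--     if practice_paragraph_file not in names:
--         raise ValueError(
--             f"Practice paragraph '{practice_paragraph_file}' is not available in loaded paragraph texts"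
--         )
--     # single pass keeping the 3 alphabetically-smallest non-practice names
--     # (with multiplicity) in a bounded ordered buffer -- no global sort
--     top3 = []
--     for name in names:
--         if name != practice_paragraph_file:
--             i = 0
--             while i < len(top3) and top3[i] <= name:
--                 i += 1
--             top3.insert(i, name)
--             del top3[3:]
--     if len(top3) < 3:
--         raise ValueError("Reading counterbalancing requires at least 3 non-practice paragraphs")
--     return _perms(top3)
-- ===== Notes on version B (the rewrite author's own statement) =====
-- stated objective: alternative
-- what changed: Replaces sort-then-filter-then-take-3 plus itertools.permutations by a single pass maintaining a bounded ordered buffer of the 3 smallest non-practice names, and a hand-written recursive selection permutation generator.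
import Mathlib
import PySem

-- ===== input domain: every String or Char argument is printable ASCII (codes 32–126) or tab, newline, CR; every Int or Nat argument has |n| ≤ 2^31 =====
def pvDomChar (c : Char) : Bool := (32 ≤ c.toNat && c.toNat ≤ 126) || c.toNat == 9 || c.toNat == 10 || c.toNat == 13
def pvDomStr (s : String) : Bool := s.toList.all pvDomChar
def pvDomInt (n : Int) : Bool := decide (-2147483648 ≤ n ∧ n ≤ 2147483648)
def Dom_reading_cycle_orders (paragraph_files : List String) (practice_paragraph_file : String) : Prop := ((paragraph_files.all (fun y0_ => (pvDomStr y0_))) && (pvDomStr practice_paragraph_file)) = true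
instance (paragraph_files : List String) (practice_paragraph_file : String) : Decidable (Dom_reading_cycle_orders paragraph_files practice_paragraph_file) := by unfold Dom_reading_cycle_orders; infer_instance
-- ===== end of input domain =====

-- B replaces sort+filter+take-3 and itertools.permutations by a single pass keeping a
-- bounded ordered buffer of the 3 smallest non-practice names plus a recursive
-- selection-based permutation generator (objective: alternative).

-- ===== PORT A =====
def reading_cycle_orders (paragraph_files : List String) (practice_paragraph_file : String) : List (List String) :=
  let files := PySem.List.sorted paragraph_files (fun x => x) false
  if practice_paragraph_file ∈ files then
    let main_candidates := files.filter (fun name => name != practice_paragraph_file)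
    if main_candidates.length < 3 then []   -- Python raises ValueError here (outside Pre_)
    else
      let main_set := main_candidates.take 3
      PySem.List.permutations main_set 3
  else []   -- Python raises ValueError here (outside Pre_)

-- ===== PORT B =====
-- insertion of `name` into the ordered buffer: skip while top3[i] <= name
def insLe (x : String) : List String → List String
  | [] => [x]
  | y :: ys => if y ≤ x then y :: insLe x ys else x :: y :: ys

-- _perms: pick each element in turn (pairs (items[i], items[:i]+items[i+1:])), permute the rest.
-- Fuel = length of the list, a pure totality device (never exhausted on reachable calls).
def selections (x : String) (xs : List String) : List (String × List String) :=
  match xs with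
  | [] => [(x, [])]
  | y :: ys => (x, y :: ys) :: (selections y ys).map (fun p => (p.1, x :: p.2))

def permsAux : Nat → List String → List (List String)
  | _, [] => [[]]
  | 0, _ :: _ => []   -- unreachable: fuel equals the list length
  | n + 1, x :: xs => (selections x xs).flatMap (fun p => (permsAux n p.2).map (p.1 :: ·))

def permsB (l : List String) : List (List String) := permsAux l.length l

def reading_cycle_orders_alt (paragraph_files : List String) (practice_paragraph_file : String) : List (List String) :=
  if practice_paragraph_file ∈ paragraph_files then
    let top3 := paragraph_files.foldl
      (fun acc name => if name != practice_paragraph_file then (insLe name acc).take 3 else acc) []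
    if top3.length < 3 then []   -- Python raises ValueError here (outside Pre_)
    else permsB top3
  else []   -- Python raises ValueError here (outside Pre_)

-- ===== PRECONDITION & SPEC =====
-- Pre_ excludes exactly the inputs on which A raises ValueError: the practice paragraph
-- missing from the list, or fewer than 3 non-practice paragraphs.
def Pre_reading_cycle_orders (paragraph_files : List String) (practice_paragraph_file : String) : Prop :=
  practice_paragraph_file ∈ paragraph_files ∧
  3 ≤ (paragraph_files.filter (fun name => name != practice_paragraph_file)).length
instance (paragraph_files : List String) (practice_paragraph_file : String) : Decidable (Pre_reading_cycle_orders paragraph_files practice_paragraph_file) := by unfold Pre_reading_cycle_orders; infer_instance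

def pvWitness_reading_cycle_orders : List String × String := (["p1", "p2", "p3", "pr"], "pr")

def Spec_reading_cycle_orders (paragraph_files : List String) (practice_paragraph_file : String) (out : List (List String)) : Prop := out = reading_cycle_orders_alt paragraph_files practice_paragraph_file
instance (paragraph_files : List String) (practice_paragraph_file : String) (out : List (List String)) : Decidable (Spec_reading_cycle_orders paragraph_files practice_paragraph_file out) := by unfold Spec_reading_cycle_orders; infer_instance

-- ===== CLAIM =====
def Claim_equal_reading_cycle_orders : Prop := ∀ (paragraph_files : List String) (practice_paragraph_file : String), Dom_reading_cycle_orders paragraph_files practice_paragraph_file → Pre_reading_cycle_orders paragraph_files practice_paragraph_file → Spec_reading_cycle_orders paragraph_files practice_paragraph_file (reading_cycle_orders paragraph_files practice_paragraph_file)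

-- ===== LEMMAS AND PROOFS =====

-- the inline filter in B's fold can be pulled out
theorem foldl_filter_insTrunc (p : String) (l : List String) (acc : List String) :
    l.foldl (fun acc name => if name != p then (insLe name acc).take 3 else acc) acc =
      (l.filter (fun name => name != p)).foldl (fun acc name => (insLe name acc).take 3) acc := by
  induction l generalizing acc with
  | nil => rfl
  | cons x xs ih =>
      simp only [List.foldl_cons, List.filter_cons]
      by_cases h : (x != p) = true
      · rw [if_pos h, if_pos h, List.foldl_cons, ih]
      · rw [if_neg h, if_neg h, ih]

-- truncation commutes with ordered insertion
theorem take_insLe (x : String) (s : List String) (n : Nat) :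
    (insLe x s).take n = (insLe x (s.take n)).take n := by
  induction s generalizing n with
  | nil => simp [insLe]
  | cons a t ih =>
      cases n with
      | zero => simp
      | succ m =>
          simp only [List.take_succ_cons, insLe]
          split_ifs with h
          · simp only [List.take_succ_cons, ih]
          · simp only [List.take_succ_cons]
            cases m with
            | zero => simp
            | succ k =>
                simp only [List.take_succ_cons, List.take_take]
                rw [Nat.min_eq_left (Nat.le_succ k)]

-- insertion sort only cares about the first 3 elements of the accumulator, up to take 3
theorem foldl_insLe_take_congr (l : List String) (a1 a2 : List String)
    (h : a1.take 3 = a2.take 3) :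
    (l.foldl (fun acc x => insLe x acc) a1).take 3 =
      (l.foldl (fun acc x => insLe x acc) a2).take 3 := by
  induction l generalizing a1 a2 with
  | nil => exact h
  | cons x xs ih =>
      simp only [List.foldl_cons]
      exact ih _ _ (by rw [take_insLe, h, ← take_insLe])

-- the bounded-buffer fold is insertion sort followed by take 3
theorem foldl_insTrunc_eq (l : List String) (acc : List String) (h : acc.take 3 = acc) :
    l.foldl (fun acc x => (insLe x acc).take 3) acc =
      (l.foldl (fun acc x => insLe x acc) acc).take 3 := by
  induction l generalizing acc with
  | nil => exact h.symm
  | cons x xs ih =>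
      simp only [List.foldl_cons]
      rw [ih _ (by simp [List.take_take])]
      exact foldl_insLe_take_congr _ _ _ (by simp [List.take_take])

theorem insLe_perm (x : String) (s : List String) : (insLe x s).Perm (x :: s) := by
  induction s with
  | nil => simp [insLe]
  | cons a t ih =>
      simp only [insLe]
      split_ifs with h
      · exact (ih.cons a).trans (List.Perm.swap x a t)
      · exact List.Perm.refl _

theorem insLe_pairwise (x : String) (s : List String) (h : s.Pairwise (· ≤ ·)) :
    (insLe x s).Pairwise (· ≤ ·) := by
  induction s with
  | nil => simp [insLe]
  | cons a t ih =>
      rcases List.pairwise_cons.mp h with ⟨ha, ht⟩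
      simp only [insLe]
      split_ifs with hax
      · refine List.pairwise_cons.mpr ⟨?_, ih ht⟩
        intro y hy
        rcases List.mem_cons.mp ((insLe_perm x t).mem_iff.mp hy) with rfl | hyt
        · exact hax
        · exact ha y hyt
      · refine List.pairwise_cons.mpr ⟨?_, h⟩
        intro y hy
        rcases List.mem_cons.mp hy with rfl | hyt
        · exact le_of_not_ge hax
        · exact le_of_lt (lt_of_lt_of_le (lt_of_not_ge hax) (ha y hyt))

theorem foldl_insLe_perm (l : List String) (acc : List String) :
    (l.foldl (fun acc x => insLe x acc) acc).Perm (acc ++ l) := by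
  induction l generalizing acc with
  | nil => simp
  | cons x xs ih =>
      simp only [List.foldl_cons]
      refine (ih _).trans ?_
      have h1 : (insLe x acc ++ xs).Perm ((x :: acc) ++ xs) :=
        (insLe_perm x acc).append_right xs
      refine h1.trans ?_
      simpa using List.perm_middle.symm

theorem foldl_insLe_pairwise (l : List String) (acc : List String)
    (h : acc.Pairwise (· ≤ ·)) :
    (l.foldl (fun acc x => insLe x acc) acc).Pairwise (· ≤ ·) := by
  induction l generalizing acc with
  | nil => exact h
  | cons x xs ih => exact ih _ (insLe_pairwise x acc h)

-- the hand-written insertion sort computes PySem's sorted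
theorem foldl_insLe_eq_sorted (l : List String) :
    l.foldl (fun acc x => insLe x acc) [] = PySem.List.sorted l (fun x => x) false := by
  symm
  refine PySem.List.sorted_id_eq_of_perm_of_pairwise _ _ ?_ ?_
  · simpa using foldl_insLe_perm l []
  · exact foldl_insLe_pairwise l [] (by simp)

-- filtering a sorted list sorts the filtered list
theorem filter_sorted_eq (p : String) (pf : List String) :
    (PySem.List.sorted pf (fun x => x) false).filter (fun name => name != p) =
      PySem.List.sorted (pf.filter (fun name => name != p)) (fun x => x) false := by
  symm
  refine PySem.List.sorted_id_eq_of_perm_of_pairwise _ _ ?_ ?_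
  · exact (PySem.List.sorted_perm pf _ _).filter _
  · exact List.Pairwise.sublist List.filter_sublist (PySem.List.sorted_pairwise pf _)

theorem perms3_eq (a b c : String) :
    PySem.List.permutations [a, b, c] 3 =
      permsB [a, b, c] := rfl

-- ===== VERDICT =====
theorem reading_cycle_orders_spec : Claim_equal_reading_cycle_orders := by
  intro pf p _ hpre
  obtain ⟨hmem, hlen⟩ := hpre
  unfold Spec_reading_cycle_orders reading_cycle_orders reading_cycle_orders_alt
  simp only
  have hmem' : p ∈ PySem.List.sorted pf (fun x => x) false :=
    (PySem.List.mem_sorted _ _ _ _).2 hmem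
  have htop : pf.foldl
      (fun acc name => if name != p then (insLe name acc).take 3 else acc) [] =
      ((PySem.List.sorted pf (fun x => x) false).filter (fun name => name != p)).take 3 := by
    rw [foldl_filter_insTrunc, foldl_insTrunc_eq _ _ rfl, foldl_insLe_eq_sorted,
      filter_sorted_eq]
  have hflen : 3 ≤ ((PySem.List.sorted pf (fun x => x) false).filter (fun name => name != p)).length := by
    rw [filter_sorted_eq, PySem.List.length_sorted]
    exact hlen
  have htoplen : (pf.foldl
      (fun acc name => if name != p then (insLe name acc).take 3 else acc) []).length = 3 := by
    rw [htop, List.length_take]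
    omega
  rw [if_pos hmem', if_pos hmem, if_neg (by omega), if_neg (by omega), htop]
  obtain ⟨a, b, c, htake⟩ :
      ∃ a b c, ((PySem.List.sorted pf (fun x => x) false).filter (fun name => name != p)).take 3
        = [a, b, c] := by
    match h : ((PySem.List.sorted pf (fun x => x) false).filter (fun name => name != p)), hflen with
    | a :: b :: c :: _, _ => exact ⟨a, b, c, by simp⟩
  rw [htake, perms3_eq]
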